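-- pv_equiv track=rewrite | github.com/moinshaikh123/Social-Computing-Assignments | Assigment 2/compute.py | calculate_Discernability
-- ===== SOURCE A (Python) =====
-- def debug(x):
-- 	if(x==x):
--
-- 		return 0
-- 	else:
-- 		return 1
--
-- def calculate_Discernability(fin_result):
--
-- 	discernabilty=0
-- 	k=0
-- 	temp=fin_result[0]
-- 	for r in fin_result:
-- 		if(r==temp):
-- 			k=k+1
-- 		else:
-- 			discernabilty=discernabilty+k*k
-- 			debug(discernabilty)
-- 			temp=r
-- 			k=1
-- 	discernabilty=discernabilty+k*k
--
-- 	return discernabilty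
-- ===== SOURCE B (Python) =====
-- def calculate_Discernability(fin_result):
--     n = len(fin_result)
--     starts = [i for i in range(n) if i == 0 or fin_result[i] != fin_result[i - 1]]
--     bounds = starts + [n]
--     return sum((b - a) * (b - a) for a, b in zip(bounds, bounds[1:]))
-- ===== Notes on version B (the rewrite author's own statement) =====
-- stated objective: alternative
-- what changed: Replaces A's one-pass loop carrying (counter, previous-value, accumulator) state by a staged index computation: first build the explicit list of run-start indices by filtering range(n), append n, then sum the squared differences of consecutive boundary indices.
import Mathlib
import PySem

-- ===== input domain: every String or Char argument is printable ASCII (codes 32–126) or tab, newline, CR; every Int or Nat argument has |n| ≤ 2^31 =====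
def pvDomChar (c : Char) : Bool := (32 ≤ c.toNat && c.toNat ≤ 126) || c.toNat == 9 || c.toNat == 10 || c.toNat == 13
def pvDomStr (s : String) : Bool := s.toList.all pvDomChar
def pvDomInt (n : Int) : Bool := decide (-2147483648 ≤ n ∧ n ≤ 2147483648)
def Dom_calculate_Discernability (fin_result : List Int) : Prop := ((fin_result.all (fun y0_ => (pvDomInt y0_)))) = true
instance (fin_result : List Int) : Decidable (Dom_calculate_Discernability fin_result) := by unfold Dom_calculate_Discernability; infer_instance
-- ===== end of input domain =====

-- B replaces A's stateful one-pass loop by a staged computation: build the list of run-start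
-- indices by filtering range(n), then sum squared differences of consecutive boundaries.


-- ===== PORT A =====
-- A: temp := fin_result[0]; loop over all elements with state (discernabilty, k, temp);
-- finally add k*k.  (debug is a no-op returning 0; it does not affect the state.)
def pvStepA (s : Int × Int × Int) (r : Int) : Int × Int × Int :=
  let (d, k, temp) := s
  if r == temp then (d, k + 1, temp) else (d + k * k, 1, r)

def calculate_Discernability (fin_result : List Int) : Int :=
  match fin_result with
  | [] => 0  -- Python raises IndexError here (fin_result[0]); excluded by Pre_
  | t :: _ =>
    let (d, k, _) := fin_result.foldl pvStepA (0, 0, t)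
    d + k * k

-- ===== PORT B =====
-- Source B: starts = [i for i in range(n) if i == 0 or fin_result[i] != fin_result[i-1]];
-- bounds = starts + [n]; sum of (b-a)*(b-a) over consecutive pairs.
-- All indexing is in range (the i-1 access is shielded by the i == 0 disjunct), so getD is exact.
def calculate_Discernability_alt (fin_result : List Int) : Int :=
  let n := fin_result.length
  let starts := (List.range n).filter
    (fun i => i == 0 || !(fin_result.getD i 0 == fin_result.getD (i - 1) 0))
  let bounds := starts ++ [n]
  ((bounds.zip bounds.tail).map (fun p => ((p.2 : Int) - (p.1 : Int)) * ((p.2 : Int) - (p.1 : Int)))).sum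

-- ===== PRECONDITION & SPEC =====
-- Pre_ excludes exactly the empty list, on which A raises IndexError (fin_result[0]).
def Pre_calculate_Discernability (fin_result : List Int) : Prop := fin_result ≠ []
instance (fin_result : List Int) : Decidable (Pre_calculate_Discernability fin_result) := by
  unfold Pre_calculate_Discernability; infer_instance
def pvWitness_calculate_Discernability : List Int := [1, 1, 2]

def Spec_calculate_Discernability (fin_result : List Int) (out : Int) : Prop := out = calculate_Discernability_alt fin_result
instance (fin_result : List Int) (out : Int) : Decidable (Spec_calculate_Discernability fin_result out) := by unfold Spec_calculate_Discernability; infer_instance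

-- ===== CLAIM (what is proved, stated in full; the proofs are below) =====
def Claim_equal_calculate_Discernability : Prop := ∀ (fin_result : List Int), Dom_calculate_Discernability fin_result → Pre_calculate_Discernability fin_result → Spec_calculate_Discernability fin_result (calculate_Discernability fin_result)

-- ===== LEMMAS AND PROOFS =====

-- proof-side run-start indices of xs, given the element prev preceding xs
def pvBset (prev : Int) : List Int → List Nat
  | [] => []
  | y :: ys => if y == prev then (pvBset y ys).map Nat.succ else 0 :: (pvBset y ys).map Nat.succ

-- proof-side squared-difference sum: boundaries bs between last and the final boundary n
def pvDsum (last : Int) : List Nat → Nat → Int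
  | [], n => ((n : Int) - last) * ((n : Int) - last)
  | b :: bs, n => ((b : Int) - last) * ((b : Int) - last) + pvDsum (b : Int) bs n

theorem pvDsum_shift : ∀ (bs : List Nat) (last : Int) (n : Nat),
    pvDsum (last + 1) (bs.map Nat.succ) (n + 1) = pvDsum last bs n := by
  intro bs
  induction bs with
  | nil => intro last n; simp only [List.map_nil, pvDsum]; push_cast; ring
  | cons b bs ih =>
    intro last n
    simp only [List.map_cons, pvDsum]
    rw [show ((Nat.succ b : Nat) : Int) = (b : Int) + 1 by push_cast; ring, ih]
    ring_nf

theorem pvDsum_shift0 (bs : List Nat) (n : Nat) :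
    pvDsum 0 (bs.map Nat.succ) (n + 1) = pvDsum (-1) bs n := by
  rw [show (0 : Int) = -1 + 1 by ring]
  exact pvDsum_shift bs (-1) n

-- B's filtered index list, shifted past the head, equals pvBset
theorem pvStarts_eq : ∀ (rest : List Int) (prev : Int),
    (List.range rest.length).filter
        (fun i => !(rest.getD i 0 == (prev :: rest).getD i 0))
      = pvBset prev rest := by
  intro rest
  induction rest with
  | nil => intro prev; simp [pvBset]
  | cons y ys ih =>
    intro prev
    simp only [List.length_cons]
    rw [List.range_succ_eq_map, List.filter_cons, List.filter_map]
    have hcomp : ((fun i => !((y :: ys).getD i 0 == (prev :: y :: ys).getD i 0)) ∘ Nat.succ)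
        = (fun i => !(ys.getD i 0 == (y :: ys).getD i 0)) := by
      funext i; simp
    rw [hcomp, ih y]
    by_cases h : y == prev
    · simp [pvBset, h]
    · simp [pvBset, h]

-- the zip-of-consecutive-pairs sum equals pvDsum
theorem pvZipsum_eq : ∀ (bs : List Nat) (a n : Nat),
    ((((a :: (bs ++ [n])).zip (bs ++ [n])).map
        (fun p => ((p.2 : Int) - (p.1 : Int)) * ((p.2 : Int) - (p.1 : Int)))).sum)
      = pvDsum (a : Int) bs n := by
  intro bs
  induction bs with
  | nil => intro a n; simp [pvDsum]
  | cons b bs ih =>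
    intro a n
    simp only [List.cons_append, List.zip_cons_cons, List.map_cons, List.sum_cons, pvDsum]
    linear_combination ih b n

-- key lemma: A's fold started mid-run equals pvDsum over pvBset
theorem pvKey : ∀ (xs : List Int) (d k t : Int),
    (xs.foldl pvStepA (d, k, t)).1
        + (xs.foldl pvStepA (d, k, t)).2.1 * (xs.foldl pvStepA (d, k, t)).2.1
      = d + pvDsum (-k) (pvBset t xs) xs.length := by
  intro xs
  induction xs with
  | nil =>
    intro d k t
    simp only [List.foldl_nil, List.length_nil, pvBset, pvDsum]
    push_cast; ring
  | cons y ys ih =>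
    intro d k t
    simp only [List.foldl_cons, pvStepA, pvBset, List.length_cons]
    by_cases h : y == t
    · have ht : y = t := by simpa using h
      subst ht
      simp only [h, if_pos]
      rw [show (-k : Int) = -(k + 1) + 1 by ring, pvDsum_shift]
      exact ih d (k + 1) y
    · simp only [h, Bool.false_eq_true, if_neg, not_false_iff, pvDsum]
      rw [Nat.cast_zero, pvDsum_shift0]
      linear_combination ih (d + k * k) 1 y

-- destructuring-let on a pair equals the projections (Prod eta)
theorem pvMatchProd (s : Int × Int × Int) :
    (let (d, k, _) := s; d + k * k) = s.1 + s.2.1 * s.2.1 := rfl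

-- B on a nonempty list equals pvDsum over pvBset
theorem pvAlt_eq (t : Int) (rest : List Int) :
    calculate_Discernability_alt (t :: rest) = pvDsum (-1) (pvBset t rest) rest.length := by
  unfold calculate_Discernability_alt
  simp only [List.length_cons]
  rw [List.range_succ_eq_map, List.filter_cons, List.filter_map]
  have h0 : (((0 : Nat) == 0) || !((t :: rest).getD 0 0 == (t :: rest).getD (0 - 1) 0)) = true := by
    simp
  rw [h0]
  have hcomp : ((fun i => (i == 0 || !((t :: rest).getD i 0 == (t :: rest).getD (i - 1) 0))) ∘ Nat.succ)
      = (fun i => !(rest.getD i 0 == (t :: rest).getD i 0)) := by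
    funext i; simp
  rw [hcomp, pvStarts_eq rest t]
  simp only [if_true, List.cons_append, List.tail_cons]
  rw [pvZipsum_eq ((pvBset t rest).map Nat.succ) 0 (rest.length + 1)]
  rw [Nat.cast_zero, pvDsum_shift0]

-- ===== VERDICT (by name: the statement is the Claim_ definition above) =====
theorem calculate_Discernability_spec : Claim_equal_calculate_Discernability := by
  intro fin_result _ hpre
  unfold Spec_calculate_Discernability
  match fin_result with
  | [] => exact absurd rfl hpre
  | t :: rest =>
    show (let (d, k, _) := (t :: rest).foldl pvStepA (0, 0, t); d + k * k)
        = calculate_Discernability_alt (t :: rest)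
    rw [pvMatchProd, pvAlt_eq]
    simp only [List.foldl_cons, pvStepA, beq_self_eq_true, if_pos]
    have := pvKey rest 0 1 t
    simpa using this
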